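-- pv_equiv track=rewrite | github.com/TheNamlessGuy/Innovativ-Programmering | TDP015/inlämning_1/uppg4.py | calc_all_values
-- ===== SOURCE A (Python) =====
-- def calc_values(mod, length):
--     length = 2 ** length
--     amount = 0
--     bool_val = False
--     return_array = []
--
--     while (amount < length):
--         for i in range(mod):
--             return_array.append(bool_val)
--             amount += 1
--         bool_val = not bool_val
--     return return_array
--
-- def calc_all_values(name_array):
--     # Makes use of the fact that the variables values follow a pattern
--     # of doubling the window of True and False.
--     # For example:
--     #     If we have two variables (a, b), and calculate all their values, we
--     #     can see that a will take on the pattern 0, 1, 0, 1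
--     #     while b will take on the pattern 0, 0, 1, 1
--     #     thus doubling the window of 0's and 1's
--     # This is of course not the only truth, but it is true nonetheless
--
--     mod = 1
--     vals = {}
--
--     for i in name_array:
--         vals[i] = calc_values(mod, len(name_array))
--         mod *= 2
--
--     return_array = []
--     for value in range(2 ** len(name_array)):
--         temp = {}
--         for name in name_array:
--             temp[name] = vals[name][value]
--         return_array.append(temp)
--
--     return return_array
-- ===== SOURCE B (Python) =====
-- def calc_all_values(name_array):
--     # Row `value` of the truth table is read off directly from the bits of the
--     # row index: variable i gets bit i of `value`.
--     return [{name: bool(value // 2 ** i % 2) for i, name in enumerate(name_array)}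
--             for value in range(2 ** len(name_array))]
-- ===== Notes on version B (the rewrite author's own statement) =====
-- stated objective: simpler
-- what changed: Instead of precomputing one full 2^n-long alternating column per variable (calc_values) and then reading columns back row by row, B builds each row directly from the bits of the row index (variable i gets value//2**i % 2), as a single nested comprehension with no precomputation.
import Mathlib
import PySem

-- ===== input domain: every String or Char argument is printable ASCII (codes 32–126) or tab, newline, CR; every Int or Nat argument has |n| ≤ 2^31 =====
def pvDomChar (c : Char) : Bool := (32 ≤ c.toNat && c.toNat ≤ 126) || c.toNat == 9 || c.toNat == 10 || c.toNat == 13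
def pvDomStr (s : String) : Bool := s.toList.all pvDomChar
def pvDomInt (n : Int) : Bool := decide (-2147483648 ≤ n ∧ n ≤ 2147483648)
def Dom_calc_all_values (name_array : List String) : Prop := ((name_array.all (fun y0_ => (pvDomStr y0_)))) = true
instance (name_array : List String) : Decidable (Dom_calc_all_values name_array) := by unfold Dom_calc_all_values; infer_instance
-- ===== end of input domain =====

-- B replaces A's per-variable precomputed alternating columns by reading each truth-table
-- row directly off the bits of the row index (objective: simpler; same asymptotic cost).

-- ===== PORT A =====
-- while (amount < length): … — the Python loop diverges only when mod ≤ 0, which no call site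
-- reaches (mod is a power of two); the fuel is an upper bound on the rounds actually executed,
-- so the port is exact wherever calc_all_values calls it.
def calcValuesLoop (mod length : Int) (fuel : Nat) (amount : Int) (bool_val : Bool)
    (return_array : List Bool) : List Bool :=
  match fuel with
  | 0 => return_array
  | f + 1 =>
    if amount < length then
      -- for i in range(mod): return_array.append(bool_val); amount += 1
      let s := (PySem.List.pyRange 0 mod 1).foldl
        (fun (s : List Bool × Int) _ => (s.1 ++ [bool_val], s.2 + 1)) (return_array, amount)
      calcValuesLoop mod length f s.2 (!bool_val) s.1
    else return_array

-- every call site passes length = len(name_array) ≥ 0, so `2 ** length` is 2 ^ length.toNat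
def calc_values (mod length : Int) : List Bool :=
  let length2 : Int := 2 ^ length.toNat
  calcValuesLoop mod length2 (length2.toNat + 1) 0 false []

def calc_all_values (name_array : List String) : List (List (String × Bool)) :=
  let vals := (name_array.foldl
      (fun (s : Int × PySem.Dict String (List Bool)) i =>
        (s.1 * 2, s.2.insert i (calc_values s.1 (name_array.length : Int))))
      ((1 : Int), PySem.Dict.empty)).2
  -- vals[name][value]: the KeyError/IndexError branches are unreachable (every name is a key
  -- of vals and each column has length 2 ** len(name_array) > value), so getD defaults are exact
  (PySem.List.pyRange 0 ((2 : Int) ^ name_array.length) 1).foldl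
    (fun return_array value =>
      return_array ++ [(name_array.foldl
          (fun (temp : PySem.Dict String Bool) name =>
            temp.insert name (PySem.List.pyGetD (vals.getD name []) value false))
          PySem.Dict.empty).items])
    []

-- ===== PORT B =====
-- {name: bool(value // 2 ** i % 2) for i, name in enumerate(name_array)}
-- for value in range(2 ** len(name_array)); enumerate indices are ≥ 0, so 2 ** i is 2 ^ i.toNat
def calc_all_values_alt (name_array : List String) : List (List (String × Bool)) :=
  (PySem.List.pyRange 0 ((2 : Int) ^ name_array.length) 1).map (fun value =>
    ((PySem.List.enumerate name_array 0).foldl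
      (fun (d : PySem.Dict String Bool) p =>
        d.insert p.2 ((PySem.Int.mod (PySem.Int.floordiv value (2 ^ p.1.toNat)) 2) != 0))
      PySem.Dict.empty).items)

-- ===== PRECONDITION & SPEC =====
def Spec_calc_all_values (name_array : List String) (out : List (List (String × Bool))) : Prop := out = calc_all_values_alt name_array
instance (name_array : List String) (out : List (List (String × Bool))) : Decidable (Spec_calc_all_values name_array out) := by unfold Spec_calc_all_values; infer_instance

-- ===== CLAIM (what is proved, stated in full; the proofs are below) =====
def Claim_equal_calc_all_values : Prop := ∀ (name_array : List String), Dom_calc_all_values name_array → Spec_calc_all_values name_array (calc_all_values name_array)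

-- ===== LEMMAS AND PROOFS =====

-- the value the key k holds after all pairs of ps have been written over dv
def lastValD {ν : Type} (dv : ν) (ps : List (String × ν)) (k : String) : ν :=
  ps.foldl (fun acc p => if p.1 = k then p.2 else acc) dv

-- keys of ps in first-occurrence order (the key order of a dict built by inserting ps)
def firstKeys (ks : List String) : List String :=
  ks.foldl (fun acc k => if k ∈ acc then acc else acc ++ [k]) []

theorem lastValD_append {ν : Type} (dv : ν) (ps : List (String × ν)) (p : String × ν) (k : String) :
    lastValD dv (ps ++ [p]) k = if p.1 = k then p.2 else lastValD dv ps k := by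
  simp [lastValD, List.foldl_append]

theorem mem_firstKeys_foldl (ks : List String) (acc : List String) (k : String) :
    k ∈ ks.foldl (fun acc k => if k ∈ acc then acc else acc ++ [k]) acc ↔ k ∈ acc ∨ k ∈ ks := by
  induction ks generalizing acc with
  | nil => simp
  | cons x xs ih =>
    simp only [List.foldl_cons]
    by_cases h : x ∈ acc
    · rw [if_pos h, ih]
      simp only [List.mem_cons]
      constructor
      · tauto
      · rintro (h1 | h1 | h1)
        · exact Or.inl h1
        · exact Or.inl (by rw [h1]; exact h)
        · exact Or.inr h1
    · rw [if_neg h, ih]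
      simp only [List.mem_append, List.mem_cons, List.not_mem_nil, or_false]
      tauto

theorem mem_firstKeys (ks : List String) (k : String) : k ∈ firstKeys ks ↔ k ∈ ks := by
  rw [firstKeys, mem_firstKeys_foldl]; simp

theorem nodup_firstKeys_foldl (ks : List String) (acc : List String) (h : acc.Nodup) :
    (ks.foldl (fun acc k => if k ∈ acc then acc else acc ++ [k]) acc).Nodup := by
  induction ks generalizing acc with
  | nil => simpa
  | cons x xs ih =>
    simp only [List.foldl_cons]
    split_ifs with hx
    · exact ih acc h
    · refine ih _ (List.Nodup.append h (List.nodup_singleton x) ?_)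
      rw [List.disjoint_singleton]
      exact hx

theorem nodup_firstKeys (ks : List String) : (firstKeys ks).Nodup :=
  nodup_firstKeys_foldl ks [] (by simp)

theorem firstKeys_append (ks : List String) (k : String) :
    firstKeys (ks ++ [k]) = if k ∈ firstKeys ks then firstKeys ks else firstKeys ks ++ [k] := by
  simp [firstKeys, List.foldl_append]

-- a dict built by inserting the pairs of ps: keys in first-occurrence order, values = last write
theorem items_foldl_insert_canon {ν : Type} (dv : ν) (ps : List (String × ν)) :
    (ps.foldl (fun (d : PySem.Dict String ν) p => d.insert p.1 p.2) PySem.Dict.empty).items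
      = (firstKeys (ps.map Prod.fst)).map (fun k => (k, lastValD dv ps k)) := by
  induction ps using List.reverseRecOn with
  | nil => simp [firstKeys, lastValD, PySem.Dict.empty]
  | append_singleton ps p ih =>
    rw [List.foldl_append, List.foldl_cons, List.foldl_nil]
    have hkeys : (ps.foldl (fun (d : PySem.Dict String ν) p => d.insert p.1 p.2)
        PySem.Dict.empty).keys = firstKeys (ps.map Prod.fst) := by
      simp [PySem.Dict.keys, ih, List.map_map, Function.comp_def]
    rw [List.map_append, List.map_singleton, firstKeys_append]
    by_cases hc : p.1 ∈ firstKeys (ps.map Prod.fst)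
    · have hcont : (ps.foldl (fun (d : PySem.Dict String ν) p => d.insert p.1 p.2)
          PySem.Dict.empty).contains p.1 = true := by
        rw [PySem.Dict.contains_eq_decide_mem_keys, hkeys]
        simpa using hc
      rw [PySem.Dict.items_insert_of_contains _ _ hcont, ih, if_pos hc, List.map_map]
      refine List.map_congr_left (fun k hkmem => ?_)
      simp only [Function.comp_apply]
      by_cases h : p.1 = k
      · subst h
        simp [lastValD_append]
      · have h' : (k == p.1) = false := beq_eq_false_iff_ne.mpr (fun e => h e.symm)
        simp only [h', Bool.false_eq_true, if_false]
        rw [lastValD_append, if_neg h]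
    · have hcont : (ps.foldl (fun (d : PySem.Dict String ν) p => d.insert p.1 p.2)
          PySem.Dict.empty).contains p.1 = false := by
        rw [PySem.Dict.contains_eq_decide_mem_keys, hkeys]
        simpa using hc
      rw [PySem.Dict.items_insert_of_not_contains _ _ hcont, ih, if_neg hc, List.map_append]
      congr 1
      · refine List.map_congr_left (fun k hkmem => ?_)
        rw [lastValD_append, if_neg (fun e => hc (by rw [e]; exact hkmem))]
      · rw [List.map_singleton, lastValD_append, if_pos rfl]

-- ----- characterising A's calc_values -----

theorem foldl_append_count (l : List Int) (bv : Bool) (ret : List Bool) (amount : Int) :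
    l.foldl (fun (s : List Bool × Int) _ => (s.1 ++ [bv], s.2 + 1)) (ret, amount)
      = (ret ++ List.replicate l.length bv, amount + l.length) := by
  induction l generalizing ret amount with
  | nil => simp
  | cons x xs ih =>
    simp only [List.foldl_cons, ih, List.length_cons]
    rw [Prod.mk.injEq]
    refine ⟨?_, by push_cast; ring⟩
    simp [List.replicate_succ]

theorem calcValuesLoop_spec (m : Nat) (hm : 0 < m) (L : Nat) :
    ∀ (r fuel : Nat) (bv : Bool) (ret : List Bool), r * m ≤ L → r ≤ fuel →
    calcValuesLoop (m : Int) (L : Int) fuel ((L : Int) - r * m) bv ret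
      = ret ++ (List.range r).flatMap (fun t => List.replicate m (bv ^^ decide (t % 2 = 1))) := by
  intro r
  induction r with
  | zero =>
    intro fuel bv ret _ _
    cases fuel with
    | zero => simp [calcValuesLoop]
    | succ f =>
      rw [calcValuesLoop]
      rw [if_neg (by push_cast; omega)]
      simp
  | succ r ih =>
    intro fuel bv ret h1 h2
    cases fuel with
    | zero => omega
    | succ f =>
      rw [calcValuesLoop]
      rw [if_pos (by push_cast; nlinarith [Nat.succ_mul r m, hm])]
      have hlen : (PySem.List.pyRange 0 (m : Int) 1).length = m := by
        rw [PySem.List.length_pyRange_one]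
        simp
      simp only [foldl_append_count, hlen]
      rw [show (L : Int) - ↑(r + 1) * ↑m + ↑m = (L : Int) - ↑r * ↑m from by push_cast; ring]
      rw [ih f (!bv) (ret ++ List.replicate m bv) (by nlinarith) (by omega)]
      rw [List.append_assoc]
      congr 1
      rw [List.range_succ_eq_map, List.flatMap_cons, List.flatMap_map]
      congr 1
      · simp
      · congr 1
        funext t
        rcases Nat.mod_two_eq_zero_or_one t with h | h
        · have h1 : (t + 1) % 2 = 1 := by omega
          simp [h, h1]
        · have h1 : (t + 1) % 2 = 0 := by omega
          simp [h, h1]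

theorem flatMap_replicate (m : Nat) (f : Nat → Bool) (r : Nat) :
    (List.range r).flatMap (fun t => List.replicate m (f t))
      = (List.range (r * m)).map (fun u => f (u / m)) := by
  rcases Nat.eq_zero_or_pos m with hm | hm
  · subst hm; simp
  induction r with
  | zero => simp
  | succ r ih =>
    rw [List.range_succ, List.flatMap_append, ih, Nat.succ_mul, List.range_add,
      List.map_append, List.map_map]
    congr 1
    simp only [List.flatMap_cons, List.flatMap_nil, List.append_nil]
    have h2 : ∀ k ∈ List.range m,
        ((fun u => f (u / m)) ∘ fun x => r * m + x) k = (fun (_ : Nat) => f r) k := by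
      intro k hk
      rw [List.mem_range] at hk
      simp only [Function.comp_apply]
      congr 1
      rw [Nat.add_comm, Nat.mul_comm, Nat.add_mul_div_left _ _ hm, Nat.div_eq_of_lt hk,
        Nat.zero_add]
    rw [List.map_congr_left h2]
    simp [List.map_const']

theorem calc_values_pow (j n : Nat) (hj : j ≤ n) :
    calc_values ((2 : Int) ^ j) (n : Int)
      = (List.range (2 ^ n)).map (fun u => decide (u / 2 ^ j % 2 = 1)) := by
  have hcast2 : ((2 : Int) ^ j) = ((2 ^ j : Nat) : Int) := by push_cast; ring
  have hcastn : ((2 : Int) ^ ((n : Int)).toNat) = ((2 ^ n : Nat) : Int) := by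
    rw [Int.toNat_natCast]; push_cast; ring
  have hrm : 2 ^ (n - j) * 2 ^ j = 2 ^ n := by
    rw [← pow_add, Nat.sub_add_cancel hj]
  have hspec := calcValuesLoop_spec (2 ^ j) (Nat.two_pow_pos j) (2 ^ n)
    (2 ^ (n - j)) (2 ^ n + 1) false []
    (by rw [hrm]) (by calc 2 ^ (n - j) ≤ 2 ^ n := Nat.pow_le_pow_right (by norm_num) (by omega)
                    _ ≤ 2 ^ n + 1 := by omega)
  rw [show ((2 ^ n : Nat) : Int) - (2 ^ (n - j) : Nat) * (2 ^ j : Nat) = 0 from by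
    rw [show ((2 ^ (n - j) : Nat) : Int) * ((2 ^ j : Nat) : Int) = ((2 ^ n : Nat) : Int) from by
      push_cast [← hrm]; ring]; ring] at hspec
  unfold calc_values
  show calcValuesLoop ((2 : Int) ^ j) ((2 : Int) ^ ((n : Int)).toNat)
      (((2 : Int) ^ ((n : Int)).toNat).toNat + 1) 0 false []
    = (List.range (2 ^ n)).map (fun u => decide (u / 2 ^ j % 2 = 1))
  rw [hcastn, Int.toNat_natCast, hcast2, hspec]
  simp only [Bool.false_xor, List.nil_append]
  rw [flatMap_replicate, hrm]

-- ----- the two folds build the same rows -----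

theorem lastValD_map_key {ν : Type} (dv : ν) (f : String → ν) (names : List String) (k : String) :
    lastValD dv (names.map fun nm => (nm, f nm)) k = if k ∈ names then f k else dv := by
  induction names using List.reverseRecOn with
  | nil => simp [lastValD]
  | append_singleton ns nm ih =>
    rw [List.map_append, List.map_singleton, lastValD_append]
    by_cases h : nm = k
    · subst h; simp
    · have h' : ¬ k = nm := fun e => h e.symm
      simp [h, h', ih]

theorem lastVal_enum (names : List String) (k : String) : ∀ (s : Int), k ∈ names →
    ∃ i : Int, s ≤ i ∧ i < s + names.length ∧
      ∀ (ν : Type) (dv : ν) (F : Int → ν),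
        lastValD dv ((PySem.List.enumerate names s).map fun p => (p.2, F p.1)) k = F i := by
  induction names using List.reverseRecOn with
  | nil => intro s hk; simp at hk
  | append_singleton ns nm ih =>
    intro s hk
    by_cases h : nm = k
    · refine ⟨s + ns.length, by omega,
        by push_cast [List.length_append, List.length_singleton]; omega, fun ν dv F => ?_⟩
      rw [PySem.List.enumerate_append, List.map_append]
      simp only [PySem.List.enumerate_cons, PySem.List.enumerate_nil, List.map_cons,
        List.map_nil]
      rw [lastValD_append, if_pos h]
    · have hk' : k ∈ ns := by
        rcases List.mem_append.1 hk with h1 | h1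
        · exact h1
        · exact absurd (List.mem_singleton.1 h1).symm h
      obtain ⟨i, hi1, hi2, hF⟩ := ih s hk'
      refine ⟨i, hi1,
        by push_cast [List.length_append, List.length_singleton] at hi2 ⊢; omega,
        fun ν dv F => ?_⟩
      rw [PySem.List.enumerate_append, List.map_append]
      simp only [PySem.List.enumerate_cons, PySem.List.enumerate_nil, List.map_cons,
        List.map_nil]
      rw [lastValD_append, if_neg h]
      exact hF ν dv F

theorem vals_fold (names : List String) (nfull : Int) :
    ∀ (j : Nat) (d : PySem.Dict String (List Bool)),
    (names.foldl
        (fun (s : Int × PySem.Dict String (List Bool)) i =>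
          (s.1 * 2, s.2.insert i (calc_values s.1 nfull)))
        ((2 : Int) ^ j, d)).2
      = ((PySem.List.enumerate names (j : Int)).map
          (fun p => (p.2, calc_values ((2 : Int) ^ p.1.toNat) nfull))).foldl
          (fun d q => d.insert q.1 q.2) d := by
  induction names with
  | nil => intro j d; simp [PySem.List.enumerate_nil]
  | cons nm ns ih =>
    intro j d
    rw [List.foldl_cons]
    rw [show (2 : Int) ^ j * 2 = (2 : Int) ^ (j + 1) from by rw [pow_succ]]
    rw [ih (j + 1)]
    rw [PySem.List.enumerate_cons, List.map_cons, List.foldl_cons]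
    rw [show ((j : Int) + 1) = ((j + 1 : Nat) : Int) from by push_cast; ring]
    rw [show ((j : Int)).toNat = j from Int.toNat_natCast _]

theorem row_eq (names : List String) (v : Int) (hv0 : 0 ≤ v)
    (hvlt : v < (2 : Int) ^ names.length) :
    (names.foldl
        (fun (temp : PySem.Dict String Bool) name =>
          temp.insert name (PySem.List.pyGetD
            (((names.foldl
                (fun (s : Int × PySem.Dict String (List Bool)) i =>
                  (s.1 * 2, s.2.insert i (calc_values s.1 (names.length : Int))))
                ((1 : Int), PySem.Dict.empty)).2).getD name []) v false))
        PySem.Dict.empty).items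
      = ((PySem.List.enumerate names 0).foldl
          (fun (d : PySem.Dict String Bool) p =>
            d.insert p.2 ((PySem.Int.mod (PySem.Int.floordiv v (2 ^ p.1.toNat)) 2) != 0))
          PySem.Dict.empty).items := by
  obtain ⟨w, rfl⟩ : ∃ w : Nat, v = (w : Int) := ⟨v.toNat, (Int.toNat_of_nonneg hv0).symm⟩
  have hw : w < 2 ^ names.length := by exact_mod_cast hvlt
  have hvals := vals_fold names (names.length : Int) 0 PySem.Dict.empty
  simp only [pow_zero, Nat.cast_zero] at hvals
  rw [hvals]
  have hA : ∀ (dct : PySem.Dict String (List Bool)),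
      names.foldl (fun (temp : PySem.Dict String Bool) name =>
        temp.insert name (PySem.List.pyGetD (dct.getD name []) (w : Int) false))
        PySem.Dict.empty
      = (names.map (fun nm => (nm, PySem.List.pyGetD (dct.getD nm []) (w : Int) false))).foldl
          (fun d q => d.insert q.1 q.2) PySem.Dict.empty :=
    fun dct => by rw [List.foldl_map]
  have hB : ∀ (G : Int → Bool),
      (PySem.List.enumerate names 0).foldl
        (fun (d : PySem.Dict String Bool) p => d.insert p.2 (G p.1)) PySem.Dict.empty
      = ((PySem.List.enumerate names 0).map (fun p => (p.2, G p.1))).foldl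
          (fun d q => d.insert q.1 q.2) PySem.Dict.empty :=
    fun G => by rw [List.foldl_map]
  rw [hA, hB (fun i => ((PySem.Int.mod (PySem.Int.floordiv (w : Int) (2 ^ i.toNat)) 2) != 0))]
  rw [items_foldl_insert_canon (dv := false), items_foldl_insert_canon (dv := false)]
  have h1 : ∀ (f : String → Bool),
      (names.map (fun nm => (nm, f nm))).map Prod.fst = names := by
    intro f; rw [List.map_map]; simp [Function.comp_def]
  have h2 : ∀ (ν : Type) (F : Int → ν),
      ((PySem.List.enumerate names 0).map (fun p => (p.2, F p.1))).map Prod.fst = names := by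
    intro ν F
    rw [List.map_map]
    simp [Function.comp_def, PySem.List.map_snd_enumerate]
  rw [h1, h2 Bool (fun i => ((PySem.Int.mod (PySem.Int.floordiv (w : Int) (2 ^ i.toNat)) 2) != 0))]
  refine List.map_congr_left (fun k hkmem => ?_)
  have hk : k ∈ names := (mem_firstKeys names k).1 hkmem
  obtain ⟨i, hi1, hi2, hF⟩ := lastVal_enum names k 0 hk
  congr 1
  rw [lastValD_map_key, if_pos hk]
  rw [hF Bool false (fun i => ((PySem.Int.mod (PySem.Int.floordiv (w : Int) (2 ^ i.toNat)) 2) != 0))]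
  -- the looked-up column of vals is the one produced at k's last occurrence index i
  have hitems := items_foldl_insert_canon (dv := ([] : List Bool))
    ((PySem.List.enumerate names 0).map
      (fun p => (p.2, calc_values ((2 : Int) ^ p.1.toNat) (names.length : Int))))
  rw [h2 (List Bool) (fun i => calc_values ((2 : Int) ^ i.toNat) (names.length : Int))] at hitems
  have hkeys : ((((PySem.List.enumerate names 0).map
      (fun p => (p.2, calc_values ((2 : Int) ^ p.1.toNat) (names.length : Int)))).foldl
      (fun d q => d.insert q.1 q.2) PySem.Dict.empty)).keys = firstKeys names := by
    simp [PySem.Dict.keys, hitems, List.map_map, Function.comp_def]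
  have hnodup : ((((PySem.List.enumerate names 0).map
      (fun p => (p.2, calc_values ((2 : Int) ^ p.1.toNat) (names.length : Int)))).foldl
      (fun d q => d.insert q.1 q.2) PySem.Dict.empty)).keys.Nodup := by
    rw [hkeys]; exact nodup_firstKeys names
  have hmem : (k, lastValD [] ((PySem.List.enumerate names 0).map
      (fun p => (p.2, calc_values ((2 : Int) ^ p.1.toNat) (names.length : Int)))) k)
      ∈ ((((PySem.List.enumerate names 0).map
        (fun p => (p.2, calc_values ((2 : Int) ^ p.1.toNat) (names.length : Int)))).foldl
        (fun d q => d.insert q.1 q.2) PySem.Dict.empty)).items := by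
    rw [hitems]; exact List.mem_map.2 ⟨k, hkmem, rfl⟩
  rw [PySem.Dict.getD_of_mem_items _ hmem hnodup]
  rw [hF _ [] (fun i => calc_values ((2 : Int) ^ i.toNat) (names.length : Int))]
  have hji : i.toNat ≤ names.length := by omega
  rw [calc_values_pow i.toNat names.length hji]
  rw [PySem.List.pyGetD_natCast]
  rw [List.getD_eq_getElem _ _ (by simpa using hw)]
  rw [List.getElem_map, List.getElem_range]
  have h2p : (0 : Int) < ((2 ^ i.toNat : Nat) : Int) := by positivity
  rw [show ((2 : Int) ^ i.toNat) = ((2 ^ i.toNat : Nat) : Int) from by push_cast; ring]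
  rw [PySem.Int.floordiv_eq_ediv_of_pos h2p,
    PySem.Int.mod_eq_emod_of_pos (by norm_num : (0 : Int) < 2)]
  rw [show ((w : Int) / ((2 ^ i.toNat : Nat) : Int)) = ((w / 2 ^ i.toNat : Nat) : Int) from
    by exact (Int.natCast_ediv _ _).symm]
  rw [show (((w / 2 ^ i.toNat : Nat) : Int) % 2) = ((w / 2 ^ i.toNat % 2 : Nat) : Int) from
    by push_cast; ring]
  rcases Nat.mod_two_eq_zero_or_one (w / 2 ^ i.toNat) with h | h <;> rw [h] <;> simp

-- ===== VERDICT (by name: the statement is the Claim_ definition above) =====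
theorem calc_all_values_spec : Claim_equal_calc_all_values := by
  intro names _
  unfold Spec_calc_all_values
  simp only [calc_all_values, calc_all_values_alt]
  rw [PySem.List.foldl_append_singleton_eq_map, List.nil_append]
  refine List.map_congr_left (fun v hv => ?_)
  obtain ⟨hv0, hvlt⟩ := (PySem.List.mem_pyRange_one).1 hv
  exact row_eq names v hv0 hvlt
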